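-- pv_equiv track=rewrite | github.com/ludviglundgrens/Reversi-Python-Arcade | numpy_backend.py | count_num
-- ===== SOURCE A (Python) =====
-- def count_num(grid):
--     counter = [0,0]
--     for i in grid:
--         for j in i:
--             if j == 1:
--                 counter[0] += 1
--             if j == 2:
--                 counter[1] += 1
--     return counter
-- ===== SOURCE B (Python) =====
-- def count_num(grid):
--     flat = [j for row in grid for j in row]
--     return [flat.count(1), flat.count(2)]
-- ===== Notes on version B (the rewrite author's own statement) =====
-- stated objective: idiomatic
-- what changed: Replaces the two running counters updated by per-cell if-branches with a single flatten followed by two list.count scans over the flat cell list.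
import Mathlib
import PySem

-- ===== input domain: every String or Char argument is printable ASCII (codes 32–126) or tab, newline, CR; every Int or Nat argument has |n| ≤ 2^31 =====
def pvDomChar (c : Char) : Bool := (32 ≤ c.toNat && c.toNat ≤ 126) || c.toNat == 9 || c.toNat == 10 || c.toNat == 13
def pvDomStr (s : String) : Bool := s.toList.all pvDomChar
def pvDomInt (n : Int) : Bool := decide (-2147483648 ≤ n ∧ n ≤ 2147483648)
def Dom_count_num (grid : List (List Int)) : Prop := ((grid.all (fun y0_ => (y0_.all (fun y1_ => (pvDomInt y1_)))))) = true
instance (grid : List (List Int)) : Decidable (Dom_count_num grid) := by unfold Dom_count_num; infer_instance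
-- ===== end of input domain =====

-- B flattens the grid and counts each target value with list.count, instead of A's two
-- running counters updated by per-cell if-branches; idiomatic, same cost.

-- ===== PORT A =====
def count_num (grid : List (List Int)) : List Int :=
  let counter : Int × Int :=
    grid.foldl (fun counter i =>
      i.foldl (fun counter j =>
        let counter := if j == 1 then (counter.1 + 1, counter.2) else counter
        let counter := if j == 2 then (counter.1, counter.2 + 1) else counter
        counter) counter) (0, 0)
  [counter.1, counter.2]

-- ===== PORT B =====
def count_num_alt (grid : List (List Int)) : List Int :=
  let flat := grid.flatMap (fun row => row)
  [PySem.List.count flat 1, PySem.List.count flat 2]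

-- ===== PRECONDITION & SPEC =====
def Spec_count_num (grid : List (List Int)) (out : List Int) : Prop := out = count_num_alt grid
instance (grid : List (List Int)) (out : List Int) : Decidable (Spec_count_num grid out) := by unfold Spec_count_num; infer_instance

-- ===== CLAIM (what is proved, stated in full; the proofs are below) =====
def Claim_equal_count_num : Prop := ∀ (grid : List (List Int)), Dom_count_num grid → Spec_count_num grid (count_num grid)

-- ===== LEMMAS AND PROOFS =====
theorem count_num_row (l : List Int) (c : Int × Int) :
    l.foldl (fun counter j =>
        let counter := if j == 1 then (counter.1 + 1, counter.2) else counter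
        let counter := if j == 2 then (counter.1, counter.2 + 1) else counter
        counter) c
      = (c.1 + (l.count 1 : Int), c.2 + (l.count 2 : Int)) := by
  induction l generalizing c with
  | nil => simp
  | cons x xs ih =>
    simp only [List.foldl_cons, ih, List.count_cons]
    by_cases h1 : x = 1 <;> by_cases h2 : x = 2 <;>
      simp [h1, h2] <;> push_cast <;> ring_nf <;> omega

theorem count_num_grid (g : List (List Int)) (c : Int × Int) :
    g.foldl (fun counter i =>
        i.foldl (fun counter j =>
          let counter := if j == 1 then (counter.1 + 1, counter.2) else counter
          let counter := if j == 2 then (counter.1, counter.2 + 1) else counter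
          counter) counter) c
      = (c.1 + ((g.flatMap (fun row => row)).count 1 : Int),
         c.2 + ((g.flatMap (fun row => row)).count 2 : Int)) := by
  induction g generalizing c with
  | nil => simp
  | cons r rs ih =>
    rw [List.foldl_cons, count_num_row, ih]
    simp [List.count_append, Prod.ext_iff]
    constructor <;> push_cast <;> ring

-- ===== VERDICT (by name: the statement is the Claim_ definition above) =====
theorem count_num_spec : Claim_equal_count_num := by
  intro grid _
  unfold Spec_count_num count_num count_num_alt
  rw [count_num_grid]
  simp [PySem.List.count]
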